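-- pv_equiv track=rewrite | github.com/ThreeFive85/Practice_Coding_Test | Basic_Test/math_array/throw_ball.py | solution
-- ===== SOURCE A (Python) =====
-- def solution(numbers, k):
--     answer = 0
--     even = [numbers[i] for i in range(0, len(numbers), 2)]
--     odd = [numbers[j] for j in range(1, len(numbers), 2)]
--     if len(numbers) % 2 == 0:
--         return even[k % len(even) - 1]
--     else:
--         answer = even + odd
--         return answer[k % len(answer) - 1]
-- ===== SOURCE B (Python) =====
-- def solution(numbers, k):
--     n = len(numbers)
--     if n % 2 == 0:
--         return numbers[2 * ((k - 1) % (n // 2))]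
--     j = (k - 1) % n
--     h = (n + 1) // 2
--     if j < h:
--         return numbers[2 * j]
--     return numbers[2 * (j - h) + 1]
-- ===== Notes on version B (the rewrite author's own statement) =====
-- stated objective: faster
-- what changed: B computes the target position arithmetically ((k-1) mod the relevant length) and maps it straight back to an index into the original list, instead of materialising the even/odd sublists and concatenating them; Pre_ excludes the empty list, on which A raises ZeroDivisionError (k % 0) and B raises too.
import Mathlib
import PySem

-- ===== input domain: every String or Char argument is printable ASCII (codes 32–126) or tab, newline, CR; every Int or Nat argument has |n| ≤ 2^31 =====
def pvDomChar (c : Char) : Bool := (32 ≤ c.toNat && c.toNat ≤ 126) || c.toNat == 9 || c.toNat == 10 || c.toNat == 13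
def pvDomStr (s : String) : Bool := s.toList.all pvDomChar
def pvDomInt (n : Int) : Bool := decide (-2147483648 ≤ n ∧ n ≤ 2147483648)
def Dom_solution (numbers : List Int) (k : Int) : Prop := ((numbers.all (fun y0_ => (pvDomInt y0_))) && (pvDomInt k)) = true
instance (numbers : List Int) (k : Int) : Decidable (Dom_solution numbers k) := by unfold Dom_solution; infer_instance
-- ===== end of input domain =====

-- B replaces A's building of the even/odd sublists by O(1) index arithmetic mapped back
-- onto the original list (objective: faster; A is O(n) in list construction).

-- ===== PORT A =====
def solution (numbers : List Int) (k : Int) : Int :=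
  let even := (PySem.List.pyRange 0 (numbers.length : Int) 2).map
    (fun i => PySem.List.pyGetD numbers i 0)
  let odd := (PySem.List.pyRange 1 (numbers.length : Int) 2).map
    (fun j => PySem.List.pyGetD numbers j 0)
  if PySem.Int.mod (numbers.length : Int) 2 = 0 then
    PySem.List.pyGetD even (PySem.Int.mod k (even.length : Int) - 1) 0
  else
    let answer := even ++ odd
    PySem.List.pyGetD answer (PySem.Int.mod k (answer.length : Int) - 1) 0

-- ===== PORT B =====
def solution_alt (numbers : List Int) (k : Int) : Int :=
  let n : Int := numbers.length
  if PySem.Int.mod n 2 = 0 then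
    PySem.List.pyGetD numbers (2 * PySem.Int.mod (k - 1) (PySem.Int.floordiv n 2)) 0
  else
    let j := PySem.Int.mod (k - 1) n
    let h := PySem.Int.floordiv (n + 1) 2
    if j < h then
      PySem.List.pyGetD numbers (2 * j) 0
    else
      PySem.List.pyGetD numbers (2 * (j - h) + 1) 0

-- ===== PRECONDITION & SPEC =====
-- Pre_ excludes only the empty list, on which A raises ZeroDivisionError (k % 0).
def Pre_solution (numbers : List Int) (k : Int) : Prop := numbers ≠ []
instance (numbers : List Int) (k : Int) : Decidable (Pre_solution numbers k) := by
  unfold Pre_solution; infer_instance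
def pvWitness_solution : List Int × Int := ([3, 1, 4], 5)
def Spec_solution (numbers : List Int) (k : Int) (out : Int) : Prop := out = solution_alt numbers k
instance (numbers : List Int) (k : Int) (out : Int) : Decidable (Spec_solution numbers k out) := by
  unfold Spec_solution; infer_instance

-- ===== CLAIM (what is proved, stated in full; the proofs are below) =====
def Claim_equal_solution : Prop := ∀ (numbers : List Int) (k : Int),
  Dom_solution numbers k → Pre_solution numbers k → Spec_solution numbers k (solution numbers k)

-- ===== LEMMAS AND PROOFS =====

-- (k-1) % m is the "wrap one step left" of k % m, stated via emod.
lemma emod_sub_one (k m : Int) (hm : 0 < m) :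
    (k - 1) % m = if k % m = 0 then m - 1 else k % m - 1 := by
  have hkey : (k - 1) % m = (k % m - 1) % m := by
    rw [Int.emod_eq_emod_iff_emod_sub_eq_zero]
    have h1 : k - 1 - (k % m - 1) = m * (k / m) := by
      have := Int.emod_add_mul_ediv k m
      linarith
    rw [h1, Int.mul_emod_right]
  rw [hkey]
  by_cases hz : k % m = 0
  · rw [if_pos hz, hz]
    have h2 : (0 - 1 : Int) % m = (m - 1) % m := by
      rw [Int.emod_eq_emod_iff_emod_sub_eq_zero]
      have h3 : (0 - 1 : Int) - (m - 1) = m * (-1) := by ring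
      rw [h3, Int.mul_emod_right]
    rw [h2, Int.emod_eq_of_lt (by omega) (by omega)]
  · have hr0 : 0 ≤ k % m := Int.emod_nonneg _ (by omega)
    have hr1 : k % m < m := Int.emod_lt_of_pos _ hm
    rw [if_neg hz, Int.emod_eq_of_lt (by omega) (by omega)]

-- Python's xs[k % len(xs) - 1] is xs.getD ((k-1) mod len) 0.
lemma shift_index (xs : List Int) (k : Int) (hxs : xs ≠ []) :
    PySem.List.pyGetD xs (PySem.Int.mod k (xs.length : Int) - 1) 0
      = xs.getD (PySem.Int.mod (k - 1) (xs.length : Int)).toNat 0 := by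
  have hl : 0 < xs.length := List.length_pos_of_ne_nil hxs
  have hm : (0 : Int) < (xs.length : Int) := by exact_mod_cast hl
  rw [PySem.Int.mod_eq_emod_of_pos hm, PySem.Int.mod_eq_emod_of_pos hm, emod_sub_one k _ hm]
  by_cases hz : k % (xs.length : Int) = 0
  · rw [if_pos hz, hz]
    have h1 : (0 : Int) - 1 = -1 := by ring
    rw [h1, PySem.List.pyGetD_neg_ofNat xs 1 0 (by omega) (by omega)]
    have h2 : ((xs.length : Int) - 1).toNat = xs.length - 1 := by omega
    rw [h2, List.getD_eq_getElem _ _ (by omega)]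
  · have hr0 : 0 ≤ k % (xs.length : Int) := Int.emod_nonneg _ (by omega)
    have hr1 : k % (xs.length : Int) < (xs.length : Int) := Int.emod_lt_of_pos _ hm
    rw [if_neg hz, PySem.List.pyGetD_eq_getElem xs 0 (by omega) (by omega),
      List.getD_eq_getElem _ _ (by omega)]

theorem solution_eq (numbers : List Int) (k : Int) (h : numbers ≠ []) :
    solution numbers k = solution_alt numbers k := by
  have hl : 0 < numbers.length := List.length_pos_of_ne_nil h
  have hn : (0 : Int) < (numbers.length : Int) := by exact_mod_cast hl
  unfold solution solution_alt
  simp only [PySem.Int.mod_eq_emod_of_pos (show (0:Int) < 2 by norm_num),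
    PySem.Int.floordiv_eq_ediv_of_pos (show (0:Int) < 2 by norm_num)]
  by_cases hpar : (numbers.length : Int) % 2 = 0
  · rw [if_pos hpar, if_pos hpar]
    rw [PySem.List.pyRange_of_pos 0 (numbers.length : Int) (by norm_num)]
    rw [if_pos hn]
    have hE : ((numbers.length : Int) - 0 + 2 - 1) = (numbers.length : Int) + 1 := by ring
    rw [hE, List.map_map]
    set c : Nat := (((numbers.length : Int) + 1) / 2).toNat with hc
    have hcpos : 0 < c := by omega
    rw [shift_index _ k (by
      apply List.ne_nil_of_length_pos
      simp only [List.length_map, List.length_range]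
      omega)]
    simp only [List.length_map, List.length_range]
    have hcI : ((c : Nat) : Int) = (numbers.length : Int) / 2 := by omega
    rw [hcI]
    have hd2 : (0 : Int) < (numbers.length : Int) / 2 := by omega
    rw [PySem.Int.mod_eq_emod_of_pos hd2]
    have hmn : 0 ≤ (k - 1) % ((numbers.length : Int) / 2) :=
      Int.emod_nonneg _ (by omega)
    have hmlt : (k - 1) % ((numbers.length : Int) / 2) < (numbers.length : Int) / 2 :=
      Int.emod_lt_of_pos _ hd2
    set t := ((k - 1) % ((numbers.length : Int) / 2)).toNat with ht
    have htc : t < c := by omega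
    rw [PySem.List.getD_map_range _ c t 0 htc]
    simp only [Function.comp]
    congr 1
    have htI : ((t : Nat) : Int) = (k - 1) % ((numbers.length : Int) / 2) := by omega
    rw [htI]
    ring
  · rw [if_neg hpar, if_neg hpar]
    rw [PySem.List.pyRange_of_pos 0 (numbers.length : Int) (by norm_num),
      PySem.List.pyRange_of_pos 1 (numbers.length : Int) (by norm_num)]
    rw [if_pos hn]
    have hE : ((numbers.length : Int) - 0 + 2 - 1) = (numbers.length : Int) + 1 := by ring
    have hO : ((numbers.length : Int) - 1 + 2 - 1) = (numbers.length : Int) := by ring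
    rw [hE, hO, List.map_map, List.map_map]
    have hOc : (if (1 : Int) < (numbers.length : Int)
        then (((numbers.length : Int)) / 2).toNat else 0) = ((numbers.length : Int) / 2).toNat := by
      split_ifs with h1
      · rfl
      · omega
    rw [hOc]
    set ce : Nat := (((numbers.length : Int) + 1) / 2).toNat with hce
    set co : Nat := ((numbers.length : Int) / 2).toNat with hco
    rw [shift_index _ k (by
      apply List.ne_nil_of_length_pos
      simp only [List.length_append, List.length_map, List.length_range]
      omega)]
    simp only [List.length_append, List.length_map, List.length_range]
    have hsum : ((ce + co : Nat) : Int) = (numbers.length : Int) := by push_cast; omega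
    rw [hsum]
    rw [PySem.Int.mod_eq_emod_of_pos hn]
    have hmn : 0 ≤ (k - 1) % (numbers.length : Int) := Int.emod_nonneg _ (by omega)
    have hmlt : (k - 1) % (numbers.length : Int) < (numbers.length : Int) :=
      Int.emod_lt_of_pos _ hn
    set j := ((k - 1) % (numbers.length : Int)).toNat with hj
    by_cases hcase : (k - 1) % (numbers.length : Int) < ((numbers.length : Int) + 1) / 2
    · rw [if_pos hcase]
      have hjce : j < ce := by omega
      rw [List.getD_append _ _ _ _ (by simpa using hjce)]
      rw [PySem.List.getD_map_range _ ce j 0 hjce]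
      simp only [Function.comp]
      congr 1
      have hjI : ((j : Nat) : Int) = (k - 1) % (numbers.length : Int) := by omega
      rw [hjI]
      ring
    · rw [if_neg hcase]
      have hjce : ce ≤ j := by omega
      rw [List.getD_append_right _ _ _ _ (by simpa using hjce)]
      simp only [List.length_map, List.length_range]
      rw [PySem.List.getD_map_range _ co (j - ce) 0 (by omega)]
      simp only [Function.comp]
      congr 1
      have hjI : ((j : Nat) : Int) = (k - 1) % (numbers.length : Int) := by omega
      have hceI : ((ce : Nat) : Int) = ((numbers.length : Int) + 1) / 2 := by omega
      push_cast [Nat.cast_sub hjce]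
      rw [hjI, hceI]
      ring

-- ===== VERDICT (by name: the statement is the Claim_ definition above) =====
theorem solution_spec : Claim_equal_solution := by
  intro numbers k _ hpre
  unfold Spec_solution
  exact solution_eq numbers k hpre
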